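-- pv_equiv track=rewrite | github.com/codeguru42/aoc | 2019/day04.py | is_password1
-- ===== SOURCE A (Python) =====
-- from itertools import tee
--
-- def digits(n):
--     while n > 0:
--         yield n % 10
--         n //= 10
--
-- def pairwise(iterable):
--     "s -> (s0,s1), (s1,s2), (s2, s3), ..."
--     a, b = tee(iterable)
--     next(b, None)
--     return zip(a, b)
--
-- def is_password1(n):
--     has_double = False
--     monotonic_increasing = True
--     for a, b in pairwise(digits(n)):
--         if a == b:
--             has_double = True
--         if a < b:
--             monotonic_increasing = False
--             break
--     return has_double and monotonic_increasing
-- ===== SOURCE B (Python) =====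
-- def is_password1(n):
--     if n < 0:
--         return False
--     s = str(n)
--     return sorted(s) == list(s) and len(set(s)) < len(s)
-- ===== Notes on version B (the rewrite author's own statement) =====
-- stated objective: alternative
-- what changed: Replaces the LSB-first arithmetic digit generator with its fused adjacent-pair loop and early break by a sort-and-set formulation on str(n): the digits are non-decreasing iff sorted(s) == list(s), and a sorted string has an adjacent double iff it has any duplicate, i.e. len(set(s)) < len(s); no adjacent-pair scan remains.
import Mathlib
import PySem

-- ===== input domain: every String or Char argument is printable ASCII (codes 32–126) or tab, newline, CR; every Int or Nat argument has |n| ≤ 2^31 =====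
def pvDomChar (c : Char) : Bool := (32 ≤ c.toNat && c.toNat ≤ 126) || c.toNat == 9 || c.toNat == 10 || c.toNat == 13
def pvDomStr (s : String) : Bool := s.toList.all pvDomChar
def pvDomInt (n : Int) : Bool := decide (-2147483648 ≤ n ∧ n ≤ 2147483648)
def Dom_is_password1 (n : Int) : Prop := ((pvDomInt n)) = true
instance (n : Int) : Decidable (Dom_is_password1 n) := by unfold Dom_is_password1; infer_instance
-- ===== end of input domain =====

-- B replaces A's LSB-first arithmetic digit generator with its fused adjacent-pair loop and early break
-- by a sort-and-set formulation on str(n): sorted(s) == list(s) decides the ordering and len(set(s)) < len(s)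
-- decides the double (in a sorted string any duplicate is adjacent); alternative decomposition, same task.

-- ===== PORT A =====
-- the generator digits(n): LSB-first decimal digits while n > 0
def pvDigitsA (n : Int) : List Int :=
  if _h : 0 < n then PySem.Int.mod n 10 :: pvDigitsA (PySem.Int.floordiv n 10) else []
termination_by n.toNat
decreasing_by
  rw [PySem.Int.floordiv_eq_ediv_of_pos (by norm_num)]
  omega

-- the for-loop over pairwise(digits(n)) with its early break; state = (has_double, monotonic_increasing)
def pvLoopA : List (Int × Int) → Bool → Bool → Bool
  | [], hd, mi => hd && mi
  | (a, b) :: rest, hd, mi =>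
    let hd' := if a == b then true else hd
    if a < b then hd' && false else pvLoopA rest hd' mi

def is_password1 (n : Int) : Bool :=
  pvLoopA ((pvDigitsA n).zip (pvDigitsA n).tail) false true

-- ===== PORT B =====
def is_password1_alt (n : Int) : Bool :=
  if n < 0 then false
  else
    let cs := (PySem.Int.toStr n).toList                       -- s = str(n)
    (PySem.List.sorted cs (fun x => x) false == cs)            -- sorted(s) == list(s)
      && decide ((PySem.Set.ofList cs).length < cs.length)     -- len(set(s)) < len(s)

-- ===== PRECONDITION & SPEC =====
def Spec_is_password1 (n : Int) (out : Bool) : Prop := out = is_password1_alt n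
instance (n : Int) (out : Bool) : Decidable (Spec_is_password1 n out) := by unfold Spec_is_password1; infer_instance

-- ===== CLAIM (what is proved, stated in full; the proofs are below) =====
def Claim_equal_is_password1 : Prop := ∀ (n : Int), Dom_is_password1 n → Spec_is_password1 n (is_password1 n)

-- ===== LEMMAS AND PROOFS =====

lemma pvDigitsA_of_nonpos (n : Int) (h : n ≤ 0) : pvDigitsA n = [] := by
  rw [pvDigitsA]; simp; omega

lemma pvDigitsA_natCast (m : Nat) : pvDigitsA (m : Int) = (Nat.digits 10 m).map Int.ofNat := by
  induction m using Nat.strong_induction_on with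
  | _ m ih =>
    rcases Nat.eq_zero_or_pos m with hm | hm
    · subst hm; simp [pvDigitsA_of_nonpos]
    · rw [pvDigitsA]
      rw [dif_pos (by exact_mod_cast hm)]
      rw [show (10 : Int) = ((10 : Nat) : Int) from rfl, PySem.Int.mod_natCast,
        PySem.Int.floordiv_natCast,
        ih (m / 10) (Nat.div_lt_self hm (by norm_num)),
        Nat.digits_def' (by norm_num : 1 < 10) hm]
      simp

lemma pvToDigitsCore_eq (fuel : Nat) : ∀ (n : Nat) (acc : List Char), 0 < n → n ≤ fuel →
    Nat.toDigitsCore 10 fuel n acc = ((Nat.digits 10 n).map Nat.digitChar).reverse ++ acc := by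
  induction fuel with
  | zero => intro n acc hn hle; omega
  | succ fuel ih =>
    intro n acc hn hle
    rw [Nat.toDigitsCore]
    rw [Nat.digits_def' (by norm_num : 1 < 10) hn]
    by_cases h : n / 10 = 0
    · rw [if_pos h]
      rw [h, Nat.digits_zero]
      simp [Nat.mod_eq_of_lt (by omega : n < 10)]
    · rw [if_neg h]
      rw [ih (n / 10) _ (Nat.pos_of_ne_zero h) (by omega)]
      simp

lemma pvToDigits_eq (m : Nat) (h : 0 < m) :
    Nat.toDigits 10 m = ((Nat.digits 10 m).map Nat.digitChar).reverse := by
  rw [Nat.toDigits, pvToDigitsCore_eq (m + 1) m [] h (by omega)]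
  simp

lemma pvAll_zip_tail {α : Type} (R : α → α → Prop) [DecidableRel R] (l : List α) :
    ((l.zip l.tail).all fun p => decide (R p.1 p.2)) = true ↔ l.IsChain R := by
  induction l with
  | nil => simp
  | cons a t ih =>
    cases t with
    | nil => simp
    | cons b t' =>
      simp only [List.tail_cons, List.zip_cons_cons, List.all_cons, List.isChain_cons_cons,
        Bool.and_eq_true, decide_eq_true_eq]
      rw [← ih]
      simp

lemma pvAny_zip_tail {α : Type} (R : α → α → Prop) [DecidableRel R] (l : List α) :
    ((l.zip l.tail).any fun p => decide (R p.1 p.2)) = true ↔ ¬ l.IsChain (fun a b => ¬ R a b) := by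
  rw [← pvAll_zip_tail (fun a b => ¬ R a b) l]
  simp

lemma pvLoopA_eq (ps : List (Int × Int)) : ∀ hd : Bool,
    pvLoopA ps hd true =
      ((hd || ps.any fun p => p.1 == p.2) && ps.all fun p => !decide (p.1 < p.2)) := by
  induction ps with
  | nil => intro hd; simp [pvLoopA]
  | cons p rest ih =>
    intro hd
    obtain ⟨a, b⟩ := p
    rw [pvLoopA]
    by_cases hlt : a < b
    · simp [hlt]
    · simp only [if_neg hlt, ih]
      by_cases heq : a == b <;> simp [heq, hlt]

lemma pvDigitChar_eq_iff (a b : Nat) (ha : a < 10) (hb : b < 10) :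
    Nat.digitChar a = Nat.digitChar b ↔ a = b := by
  interval_cases a <;> interval_cases b <;> simp_all <;> decide

lemma pvDigitChar_le_iff (a b : Nat) (ha : a < 10) (hb : b < 10) :
    Nat.digitChar a ≤ Nat.digitChar b ↔ a ≤ b := by
  interval_cases a <;> interval_cases b <;> simp_all <;> decide

lemma pvIsChain_congr_mem {α : Type} {R S : α → α → Prop} (l : List α)
    (h : ∀ a ∈ l, ∀ b ∈ l, (R a b ↔ S a b)) : l.IsChain R ↔ l.IsChain S := by
  induction l with
  | nil => simp
  | cons a t ih =>
    cases t with
    | nil => simp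
    | cons b t' =>
      rw [List.isChain_cons_cons, List.isChain_cons_cons,
        h a (by simp) b (by simp),
        ih fun x hx y hy => h x (by simp [hx]) y (by simp [hy])]

-- A = true iff: some adjacent LSB-digit pair is equal, and no pair is strictly increasing (LSB order)
lemma pvA_char (m : Nat) :
    is_password1 (m : Int) = true ↔
      (¬ (Nat.digits 10 m).IsChain (fun a b => ¬ a = b) ∧
        (Nat.digits 10 m).IsChain (fun a b => ¬ a < b)) := by
  rw [is_password1, pvDigitsA_natCast, pvLoopA_eq]
  set L := Nat.digits 10 m with hL
  have htail : (L.map Int.ofNat).tail = L.tail.map Int.ofNat := by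
    cases L <;> simp
  rw [htail, List.zip_map, Bool.false_or, Bool.and_eq_true, List.any_map, List.all_map]
  rw [show ((fun p : Int × Int => p.1 == p.2) ∘ Prod.map Int.ofNat Int.ofNat) =
      (fun p : Nat × Nat => decide (p.1 = p.2)) from by
    funext p; rw [Bool.eq_iff_iff]; simp [Prod.map, Int.ofNat_eq_natCast]]
  rw [show ((fun p : Int × Int => !decide (p.1 < p.2)) ∘ Prod.map Int.ofNat Int.ofNat) =
      (fun p : Nat × Nat => decide (¬ p.1 < p.2)) from by
    funext p; rw [Bool.eq_iff_iff]; simp [Prod.map, Int.ofNat_eq_natCast]]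
  rw [pvAny_zip_tail (fun a b : Nat => a = b) L, pvAll_zip_tail (fun a b : Nat => ¬ a < b) L]

-- sorted(cs) == cs decides that cs is a non-decreasing chain
lemma pvSorted_eq_self_iff (cs : List Char) :
    (PySem.List.sorted cs (fun x => x) false = cs) ↔ cs.IsChain (· ≤ ·) := by
  constructor
  · intro h
    have hp := PySem.List.sorted_pairwise (xs := cs) (key := fun x => x)
    rw [h] at hp
    exact hp.isChain
  · intro h
    have hp : cs.Pairwise (· ≤ ·) := (List.isChain_iff_pairwise).1 h
    exact PySem.List.sorted_eq_self_of_pairwise cs (fun x => x) hp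

-- len(set(cs)) < len(cs) decides that cs has a duplicate
lemma pvSetLen_lt_iff (cs : List Char) :
    ((PySem.Set.ofList cs).length < cs.length) ↔ ¬ cs.Nodup := by
  have hmem : ∀ x, x ∈ PySem.Set.ofList cs ↔ x ∈ cs := fun x => PySem.Set.mem_ofList cs x
  have hnd : (PySem.Set.ofList cs).Nodup := PySem.Set.nodup_ofList cs
  have hfin : (PySem.Set.ofList cs).toFinset = cs.toFinset := by
    ext x; simp [List.mem_toFinset, hmem x]
  have hlen : (PySem.Set.ofList cs).length = cs.toFinset.card := by
    rw [← hfin, List.toFinset_card_of_nodup hnd]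
  rw [hlen, List.card_toFinset]
  constructor
  · intro hlt hnodup
    rw [List.Nodup.dedup hnodup] at hlt
    omega
  · intro hnodup
    have hsub : cs.dedup.Sublist cs := List.dedup_sublist cs
    rcases lt_or_eq_of_le hsub.length_le with h | h
    · exact h
    · exact absurd (hsub.eq_of_length h ▸ cs.nodup_dedup) hnodup

lemma pvChain_lt_of_le_ne : ∀ cs : List Char, cs.IsChain (· ≤ ·) →
    cs.IsChain (fun a b => ¬ a = b) → cs.IsChain (· < ·)
  | [], _, _ => List.IsChain.nil
  | [_], _, _ => by simp
  | a :: b :: t, hle, hne => by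
    rw [List.isChain_cons_cons] at hle hne ⊢
    exact ⟨lt_of_le_of_ne hle.1 hne.1, pvChain_lt_of_le_ne (b :: t) hle.2 hne.2⟩

-- in a non-decreasing chain, a duplicate exists iff an adjacent pair is equal
lemma pvNodup_iff_chain_ne (cs : List Char) (hc : cs.IsChain (· ≤ ·)) :
    cs.Nodup ↔ cs.IsChain (fun a b => ¬ a = b) := by
  constructor
  · intro hnd
    exact List.Pairwise.isChain hnd
  · intro hne
    have hlt : cs.IsChain (· < ·) := pvChain_lt_of_le_ne cs hc hne
    exact ((List.isChain_iff_pairwise).1 hlt).imp ne_of_lt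

-- B = true iff the same two chain conditions on the LSB-first digit list
lemma pvB_char (m : Nat) (hm : 0 < m) :
    is_password1_alt (m : Int) = true ↔
      (¬ (Nat.digits 10 m).IsChain (fun a b => ¬ a = b) ∧
        (Nat.digits 10 m).IsChain (fun a b => ¬ a < b)) := by
  rw [is_password1_alt, if_neg (by omega)]
  simp only [PySem.Int.toList_toStr]
  have hchars : PySem.Int.toChars (m : Int) = ((Nat.digits 10 m).map Nat.digitChar).reverse := by
    rw [PySem.Int.toChars, if_neg (by omega)]
    rw [Int.toNat_natCast, pvToDigits_eq m hm]
  rw [hchars]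
  set L := Nat.digits 10 m with hL
  set C := (L.map Nat.digitChar).reverse with hC
  have hd10 : ∀ d ∈ L, d < 10 := fun d hd => Nat.digits_lt_base (by norm_num) hd
  rw [Bool.and_eq_true, beq_iff_eq, decide_eq_true_eq, pvSorted_eq_self_iff, pvSetLen_lt_iff]
  have hCchain : C.IsChain (· ≤ ·) ↔ L.IsChain (fun a b => ¬ a < b) := by
    rw [hC, List.isChain_reverse, List.isChain_map]
    exact pvIsChain_congr_mem L fun a ha b hb => by
      rw [pvDigitChar_le_iff b a (hd10 b hb) (hd10 a ha)]
      omega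
  have hCne : C.IsChain (fun a b => ¬ a = b) ↔ L.IsChain (fun a b => ¬ a = b) := by
    rw [hC, List.isChain_reverse, List.isChain_map]
    exact pvIsChain_congr_mem L fun a ha b hb => by
      rw [not_iff_not, pvDigitChar_eq_iff b a (hd10 b hb) (hd10 a ha), eq_comm]
  constructor
  · rintro ⟨hs, hdup⟩
    refine ⟨fun hLne => hdup ?_, hCchain.1 hs⟩
    exact (pvNodup_iff_chain_ne C hs).2 (hCne.2 hLne)
  · rintro ⟨hLne, hmono⟩
    have hs := hCchain.2 hmono
    exact ⟨hs, fun hnd => hLne (hCne.1 ((pvNodup_iff_chain_ne C hs).1 hnd))⟩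

-- ===== VERDICT (by name: the statement is the Claim_ definition above) =====
theorem is_password1_spec : Claim_equal_is_password1 := by
  intro n _
  unfold Spec_is_password1
  rcases lt_trichotomy n 0 with hn | hn | hn
  · rw [is_password1, pvDigitsA_of_nonpos n (le_of_lt hn)]
    rw [is_password1_alt, if_pos hn]
    rfl
  · subst hn
    rw [is_password1, pvDigitsA_of_nonpos 0 le_rfl]
    rfl
  · obtain ⟨m, rfl⟩ : ∃ m : Nat, n = (m : Int) := ⟨n.toNat, by omega⟩
    have hm : 0 < m := by exact_mod_cast hn
    rw [Bool.eq_iff_iff, pvA_char m, pvB_char m hm]
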